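-- pv_equiv track=rewrite | github.com/Cellular-Semantics/MapMyCells2CL | experiments/explore_approaches.py | build_broad_match_map
-- ===== SOURCE A (Python) =====
-- def build_broad_match_map(
--     exact_map: dict[str, str],
--     hierarchy: dict[str, list[str]],
-- ) -> dict[str, str]:
--     """For ABA IDs without exact CL matches, walk up hierarchy to find nearest CL match.
--
--     Returns:
--         Dict mapping ABA short ID -> nearest ancestor CL URI (or None)
--     """
--     # Build short_id -> CL URI from exact map
--     exact_by_short = {}
--     for aba_uri, cl_uri in exact_map.items():
--         short = aba_uri.split("/")[-1]
--         if "/CL_" in cl_uri: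
--             exact_by_short[short] = cl_uri
--
--     broad_map: dict[str, str] = {}
--     for aba_id in hierarchy:
--         if aba_id in exact_by_short:
--             continue  # has exact match already
--         # Walk up
--         visited = {aba_id}
--         current = aba_id
--         while current in hierarchy:
--             parents = hierarchy[current]
--             if not parents:
--                 break
--             parent = parents[0]
--             if parent in visited:
--                 break
--             visited.add(parent)
--             if parent in exact_by_short:
--                 broad_map[aba_id] = exact_by_short[parent]
--                 break
--             current = parent
--
--     return broad_map
-- ===== SOURCE B (Python) =====
-- def build_broad_match_map(
--     exact_map: dict[str, str],
--     hierarchy: dict[str, list[str]],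
-- ) -> dict[str, str]:
--     """For ABA IDs without exact CL matches, walk up hierarchy to find nearest CL match.
--
--     Memoized: the nearest-match result of every node visited on a walk is cached,
--     so each node's parent chain is traversed at most once overall.
--     """
--     exact_by_short = {
--         aba_uri.split("/")[-1]: cl_uri
--         for aba_uri, cl_uri in exact_map.items()
--         if "/CL_" in cl_uri
--     }
--
--     cache: dict[str, str | None] = {}
--
--     def resolve(node: str) -> str | None:
--         path: list[str] = []
--         onpath: set[str] = set()
--         cur = node
--         while True:
--             if cur in cache:
--                 val = cache[cur]
--                 break
--             if cur in exact_by_short: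
--                 val = exact_by_short[cur]
--                 break
--             if cur in onpath:
--                 val = None  # cycle with no match
--                 break
--             path.append(cur)
--             onpath.add(cur)
--             parents = hierarchy.get(cur)
--             if not parents:
--                 val = None
--                 break
--             cur = parents[0]
--         for n in path:
--             cache[n] = val
--         return val
--
--     broad_map: dict[str, str] = {}
--     for aba_id in hierarchy:
--         if aba_id in exact_by_short:
--             continue
--         parents = hierarchy[aba_id]
--         if not parents:
--             continue
--         val = resolve(parents[0])
--         if val is not None:
--             broad_map[aba_id] = val
--     return broad_map
-- ===== Notes on version B (the rewrite author's own statement) =====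
-- stated objective: alternative
-- what changed: A walks up the parent chain independently for every node, each walk carrying its own fresh visited set; B instead memoizes one shared cache mapping every node ever visited to its nearest-CL-ancestor result, so each parent chain is traversed at most once overall and later nodes reuse their ancestors' cached results (on the random generated inputs chains are short, so no measurable speed difference).
import Mathlib
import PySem

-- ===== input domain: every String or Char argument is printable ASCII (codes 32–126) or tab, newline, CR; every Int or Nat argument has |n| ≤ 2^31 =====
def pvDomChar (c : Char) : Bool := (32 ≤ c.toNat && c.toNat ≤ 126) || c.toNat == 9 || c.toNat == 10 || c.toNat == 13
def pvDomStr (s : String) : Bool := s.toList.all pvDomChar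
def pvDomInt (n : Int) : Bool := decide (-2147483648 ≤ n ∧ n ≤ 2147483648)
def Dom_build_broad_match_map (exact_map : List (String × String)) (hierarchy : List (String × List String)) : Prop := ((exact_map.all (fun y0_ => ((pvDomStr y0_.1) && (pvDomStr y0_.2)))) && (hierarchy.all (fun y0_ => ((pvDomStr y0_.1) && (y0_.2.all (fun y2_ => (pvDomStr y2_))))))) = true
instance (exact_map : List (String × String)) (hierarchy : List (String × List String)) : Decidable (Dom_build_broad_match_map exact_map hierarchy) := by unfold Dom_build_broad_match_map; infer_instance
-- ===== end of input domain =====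

-- B replaces A's independent per-node upward walks (each with its own visited set) by a
-- single memoized resolver that caches the nearest-match result of every node it touches,
-- so each parent chain is traversed at most once overall.

-- aba_uri.split("/")[-1]  (split with a nonempty separator never fails and never returns
-- an empty list, so both defaults are dead arms; the same expression occurs in A and B)
def pvShort (u : String) : String :=
  (PySem.List.pyGet? ((PySem.Str.split? u "/").getD []) (-1)).getD ""

-- ===== PORT A =====
-- the 'exact_by_short' loop of A
def pvExactA (exact_map : List (String × String)) : PySem.Dict String String :=
  exact_map.foldl
    (fun d p => if PySem.Str.isIn "/CL_" p.2 then d.insert (pvShort p.1) p.2 else d)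
    PySem.Dict.empty

-- A's inner 'while current in hierarchy' walk; fuel only makes the loop total
-- (hierarchy.length + 1 always suffices: each iteration adds a fresh hierarchy key to visited)
def pvWalkA (exa : PySem.Dict String String) (hier : PySem.Dict String (List String)) :
    Nat → PySem.Set String → String → Option String
  | 0, _, _ => none
  | fuel + 1, visited, current =>
    match hier.get? current with
    | none => none
    | some parents =>
      match parents with
      | [] => none
      | parent :: _ =>
        if PySem.Set.contains visited parent then none
        else
          match exa.get? parent with
          | some v => some v
          | none => pvWalkA exa hier fuel (PySem.Set.add visited parent) parent

def build_broad_match_map (exact_map : List (String × String)) (hierarchy : List (String × List String)) : List (String × String) :=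
  let exa := pvExactA exact_map
  let hier : PySem.Dict String (List String) := PySem.Dict.mk hierarchy
  let broad := hierarchy.foldl
    (fun (bm : PySem.Dict String String) kv =>
      if exa.contains kv.1 then bm
      else
        match pvWalkA exa hier (hierarchy.length + 1) (PySem.Set.add PySem.Set.empty kv.1) kv.1 with
        | some v => bm.insert kv.1 v
        | none => bm)
    PySem.Dict.empty
  broad.items

-- ===== PORT B =====
-- B's 'exact_by_short' dict comprehension
def pvExactB (exact_map : List (String × String)) : PySem.Dict String String :=
  PySem.Dict.ofList
    (((exact_map.filter (fun p => PySem.Str.isIn "/CL_" p.2)).map (fun p => (pvShort p.1, p.2))))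

-- B's 'resolve' chase loop: returns (val, path of new nodes to cache); fuel only makes
-- the loop total (hierarchy.length + 2 always suffices)
def pvResolve (exa : PySem.Dict String String) (hier : PySem.Dict String (List String))
    (cache : PySem.Dict String (Option String)) :
    Nat → List String → PySem.Set String → String → Option String × List String
  | 0, path, _, _ => (none, path)
  | fuel + 1, path, onpath, cur =>
    match cache.get? cur with
    | some val => (val, path)
    | none =>
      match exa.get? cur with
      | some v => (some v, path)
      | none =>
        if PySem.Set.contains onpath cur then (none, path)
        else
          match hier.get? cur with
          | some (p :: _) =>
            pvResolve exa hier cache fuel (path ++ [cur]) (PySem.Set.add onpath cur) p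
          | _ => (none, path)

def build_broad_match_map_alt (exact_map : List (String × String)) (hierarchy : List (String × List String)) : List (String × String) :=
  let exa := pvExactB exact_map
  let hier : PySem.Dict String (List String) := PySem.Dict.mk hierarchy
  let st := hierarchy.foldl
    (fun (st : PySem.Dict String String × PySem.Dict String (Option String)) kv =>
      if exa.contains kv.1 then st
      else
        match hier.get? kv.1 with
        | some (p :: _) =>
          let r := pvResolve exa hier st.2 (hierarchy.length + 2) [] PySem.Set.empty p
          let cache' := r.2.foldl (fun c n => c.insert n r.1) st.2
          match r.1 with
          | some v => (st.1.insert kv.1 v, cache')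
          | none => (st.1, cache')
        | _ => st)
    (PySem.Dict.empty, PySem.Dict.empty)
  st.1.items

-- ===== PRECONDITION & SPEC =====
def Spec_build_broad_match_map (exact_map : List (String × String)) (hierarchy : List (String × List String)) (out : List (String × String)) : Prop := out = build_broad_match_map_alt exact_map hierarchy
instance (exact_map : List (String × String)) (hierarchy : List (String × List String)) (out : List (String × String)) : Decidable (Spec_build_broad_match_map exact_map hierarchy out) := by unfold Spec_build_broad_match_map; infer_instance

-- ===== CLAIM (what is proved, stated in full; the proofs are below) =====
def Claim_equal_build_broad_match_map : Prop := ∀ (exact_map : List (String × String)) (hierarchy : List (String × List String)), Dom_build_broad_match_map exact_map hierarchy → Spec_build_broad_match_map exact_map hierarchy (build_broad_match_map exact_map hierarchy)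

-- ===== LEMMAS AND PROOFS =====

-- the first parent of a node, if any
def pvStep (hier : PySem.Dict String (List String)) (n : String) : Option String :=
  match hier.get? n with
  | some (p :: _) => some p
  | _ => none

def pvKeys (hier : PySem.Dict String (List String)) : List String := hier.keys.dedup

lemma pvStep_mem_keys {hier : PySem.Dict String (List String)} {n p : String}
    (h : pvStep hier n = some p) : n ∈ pvKeys hier := by
  unfold pvStep at h
  cases hg : hier.get? n with
  | none => simp [hg] at h
  | some l =>
    have : n ∈ hier.keys := by
      by_contra hc
      rw [← PySem.Dict.get?_eq_none_iff_not_mem_keys] at hc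
      simp [hc] at hg
    simpa [pvKeys, List.mem_dedup] using this

lemma pv_measure_lt {l seen : List String} {n : String} (hn : n ∈ l) (hns : n ∉ seen) :
    (l.filter (fun k => decide (k ∉ n :: seen))).length
      < (l.filter (fun k => decide (k ∉ seen))).length := by
  have hsub : ∀ k, (decide (k ∉ n :: seen)) = (decide (¬ k = n) && decide (k ∉ seen)) := by
    intro k; by_cases h1 : k = n <;> by_cases h2 : k ∈ seen <;> simp [h1, h2]
  simp only [hsub]
  rw [← List.filter_filter]
  exact List.length_filter_lt_length_iff_exists.mpr ⟨n, by simp [hn, hns]⟩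

-- the reference "nearest match at-or-above n" function, cycle-cut by a seen list
def pvR (exa : PySem.Dict String String) (hier : PySem.Dict String (List String))
    (seen : List String) (n : String) : Option String :=
  if n ∈ seen then none
  else if (exa.get? n).isSome then exa.get? n
  else
    match hstep : pvStep hier n with
    | none => none
    | some p => pvR exa hier (n :: seen) p
termination_by ((pvKeys hier).filter (fun k => decide (k ∉ seen))).length
decreasing_by
  exact pv_measure_lt (pvStep_mem_keys hstep) (by assumption)

def pvRes (exa : PySem.Dict String String) (hier : PySem.Dict String (List String))
    (n : String) : Option String := pvR exa hier [] n


-- unfolding lemmas for pvR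
lemma pvR_of_mem {exa : PySem.Dict String String} {hier : PySem.Dict String (List String)}
    {seen : List String} {n : String} (h : n ∈ seen) : pvR exa hier seen n = none := by
  rw [pvR]; simp [h]

lemma pvR_of_exact {exa : PySem.Dict String String} {hier : PySem.Dict String (List String)}
    {seen : List String} {n : String} (h1 : n ∉ seen) (h2 : (exa.get? n).isSome) :
    pvR exa hier seen n = exa.get? n := by
  rw [pvR]; simp [h1, h2]

lemma pvR_of_dead {exa : PySem.Dict String String} {hier : PySem.Dict String (List String)}
    {seen : List String} {n : String} (h1 : n ∉ seen) (h2 : exa.get? n = none)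
    (h3 : pvStep hier n = none) : pvR exa hier seen n = none := by
  rw [pvR]; simp [h1, h2]
  split
  · rfl
  · rename_i p hp; rw [h3] at hp; cases hp

lemma pvR_of_step {exa : PySem.Dict String String} {hier : PySem.Dict String (List String)}
    {seen : List String} {n p : String} (h1 : n ∉ seen) (h2 : exa.get? n = none)
    (h3 : pvStep hier n = some p) : pvR exa hier seen n = pvR exa hier (n :: seen) p := by
  rw [pvR]; simp [h1, h2]
  split
  · rename_i hp; rw [h3] at hp; cases hp
  · rename_i q hq; rw [h3] at hq; cases hq; rfl

-- the seen list only matters through membership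
lemma pvR_ext {exa : PySem.Dict String String} {hier : PySem.Dict String (List String)} :
    ∀ (seen : List String) (n : String) (seen' : List String),
      (∀ x, x ∈ seen ↔ x ∈ seen') → pvR exa hier seen n = pvR exa hier seen' n := by
  intro seen n
  induction seen, n using pvR.induct exa hier with
  | case1 seen n hmem =>
    intro seen' hiff
    rw [pvR_of_mem hmem, pvR_of_mem ((hiff n).mp hmem)]
  | case2 seen n hns hex =>
    intro seen' hiff
    rw [pvR_of_exact hns hex, pvR_of_exact (fun h => hns ((hiff n).mpr h)) hex]
  | case3 seen n hns hex hst =>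
    intro seen' hiff
    have h2 : exa.get? n = none := Option.not_isSome_iff_eq_none.mp hex
    rw [pvR_of_dead hns h2 hst, pvR_of_dead (fun h => hns ((hiff n).mpr h)) h2 hst]
  | case4 seen n hns hex p hst ih =>
    intro seen' hiff
    have h2 : exa.get? n = none := Option.not_isSome_iff_eq_none.mp hex
    rw [pvR_of_step hns h2 hst, pvR_of_step (fun h => hns ((hiff n).mpr h)) h2 hst]
    exact ih (n :: seen') (by intro x; simp [hiff x])

-- a node on a step-closed, match-free set resolves to none
lemma pvR_cycle {exa : PySem.Dict String String} {hier : PySem.Dict String (List String)} :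
    ∀ (seen : List String) (n : String) (C : List String), n ∈ C →
      (∀ x ∈ C, exa.get? x = none) →
      (∀ x ∈ C, ∃ y ∈ C, pvStep hier x = some y) →
      pvR exa hier seen n = none := by
  intro seen n
  induction seen, n using pvR.induct exa hier with
  | case1 seen n hmem => intro C _ _ _; exact pvR_of_mem hmem
  | case2 seen n hns hex =>
    intro C hn hC _
    rw [hC n hn] at hex
    cases hex
  | case3 seen n hns hex hst =>
    intro C hn hC _
    exact pvR_of_dead hns (Option.not_isSome_iff_eq_none.mp hex) hst
  | case4 seen n hns hex p hst ih =>
    intro C hn hC hcl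
    rw [pvR_of_step hns (Option.not_isSome_iff_eq_none.mp hex) hst]
    obtain ⟨y, hyC, hy⟩ := hcl n hn
    rw [hst] at hy
    cases hy
    exact ih C hyC hC hcl

-- c is a consecutive first-parent chain ending one step before n
def pvChain (hier : PySem.Dict String (List String)) : List String → String → Prop
  | [], _ => True
  | c :: cs, n => pvStep hier c = some (cs.headD n) ∧ pvChain hier cs n

lemma pvChain_snoc {hier : PySem.Dict String (List String)} {n p : String} :
    ∀ {l : List String}, pvChain hier l n → pvStep hier n = some p →
      pvChain hier (l ++ [n]) p := by
  intro l
  induction l with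
  | nil => intro _ hs; exact ⟨by simpa using hs, trivial⟩
  | cons c cs ih =>
    intro hch hs
    obtain ⟨h1, h2⟩ := hch
    refine ⟨?_, ih h2 hs⟩
    cases cs <;> simpa using h1

lemma pvChain_step_mem {hier : PySem.Dict String (List String)} {n : String} :
    ∀ {c : List String}, pvChain hier c n → ∀ x ∈ c,
      ∃ y, pvStep hier x = some y ∧ (y ∈ c ∨ y = n) := by
  intro c
  induction c with
  | nil => intro _ x hx; cases hx
  | cons a cs ih =>
    intro hch x hx
    obtain ⟨h1, h2⟩ := hch
    rcases List.mem_cons.mp hx with rfl | hx'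
    · refine ⟨cs.headD n, h1, ?_⟩
      cases cs with
      | nil => right; rfl
      | cons d ds => left; simp
    · obtain ⟨y, hy, hmem⟩ := ih h2 x hx'
      refine ⟨y, hy, ?_⟩
      rcases hmem with h | h
      · exact Or.inl (List.mem_cons_of_mem _ h)
      · exact Or.inr h

-- prepending a match-free chain into n to the seen list does not change pvR
lemma pvR_chain_irrel {exa : PySem.Dict String String} {hier : PySem.Dict String (List String)} :
    ∀ (seen : List String) (n : String) (c : List String),
      pvChain hier c n → (∀ x ∈ c, exa.get? x = none) →
      pvR exa hier (c ++ seen) n = pvR exa hier seen n := by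
  intro seen n
  induction seen, n using pvR.induct exa hier with
  | case1 seen n hmem =>
    intro c _ _
    rw [pvR_of_mem hmem, pvR_of_mem (List.mem_append.mpr (Or.inr hmem))]
  | case2 seen n hns hex =>
    intro c _ hall
    have hnc : n ∉ c := fun h => by rw [hall n h] at hex; cases hex
    have hns' : n ∉ c ++ seen := by simp [hnc, hns]
    rw [pvR_of_exact hns hex, pvR_of_exact hns' hex]
  | case3 seen n hns hex hst =>
    intro c _ hall
    have h2 : exa.get? n = none := Option.not_isSome_iff_eq_none.mp hex
    rw [pvR_of_dead hns h2 hst]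
    by_cases hc : n ∈ c
    · exact pvR_of_mem (List.mem_append.mpr (Or.inl hc))
    · exact pvR_of_dead (by simp [hc, hns]) h2 hst
  | case4 seen n hns hex p hst ih =>
    intro c hch hall
    have h2 : exa.get? n = none := Option.not_isSome_iff_eq_none.mp hex
    rw [pvR_of_step hns h2 hst]
    by_cases hc : n ∈ c
    · rw [pvR_of_mem (List.mem_append.mpr (Or.inl hc))]
      have hcl : ∀ x ∈ c, ∃ y ∈ c, pvStep hier x = some y := by
        intro x hx
        obtain ⟨y, hy, hmem⟩ := pvChain_step_mem hch x hx
        rcases hmem with h | h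
        · exact ⟨y, h, hy⟩
        · exact ⟨y, h ▸ hc, hy⟩
      obtain ⟨y, hyC, hy⟩ := hcl n hc
      rw [hst] at hy
      cases hy
      exact (pvR_cycle (n :: seen) p c hyC hall hcl).symm
    · have hns' : n ∉ c ++ seen := by simp [hc, hns]
      rw [pvR_of_step hns' h2 hst]
      rw [pvR_ext (n :: (c ++ seen)) p ((c ++ [n]) ++ (n :: seen)) (by intro x; simp; tauto)]
      exact ih (c ++ [n]) (pvChain_snoc hch hst)
        (by intro x hx; rcases List.mem_append.mp hx with h | h
            · exact hall x h
            · simp at h; subst h; exact h2)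

lemma pvRes_exact {exa : PySem.Dict String String} {hier : PySem.Dict String (List String)}
    {n : String} (h : (exa.get? n).isSome) : pvRes exa hier n = exa.get? n :=
  pvR_of_exact (by simp) h

lemma pvRes_dead {exa : PySem.Dict String String} {hier : PySem.Dict String (List String)}
    {n : String} (h2 : exa.get? n = none) (h3 : pvStep hier n = none) :
    pvRes exa hier n = none :=
  pvR_of_dead (by simp) h2 h3

lemma pvRes_step {exa : PySem.Dict String String} {hier : PySem.Dict String (List String)}
    {n p : String} (h2 : exa.get? n = none) (h3 : pvStep hier n = some p) :
    pvRes exa hier n = pvRes exa hier p := by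
  unfold pvRes
  rw [pvR_of_step (by simp) h2 h3]
  exact pvR_chain_irrel [] p [n] ⟨by simpa using h3, trivial⟩ (by simpa using h2)

-- every node of a match-free chain into n resolves like n
lemma pvRes_chain_const {exa : PySem.Dict String String} {hier : PySem.Dict String (List String)}
    {n : String} : ∀ {c : List String}, pvChain hier c n →
      (∀ x ∈ c, exa.get? x = none) → ∀ m ∈ c, pvRes exa hier m = pvRes exa hier n := by
  intro c
  induction c with
  | nil => intro _ _ m hm; cases hm
  | cons a cs ih =>
    intro hch hex m hm
    obtain ⟨h1, h2⟩ := hch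
    have hex' : ∀ x ∈ cs, exa.get? x = none := fun x hx => hex x (List.mem_cons_of_mem _ hx)
    rcases List.mem_cons.mp hm with rfl | hm'
    · have := pvRes_step (hex m (List.mem_cons_self)) h1
      rw [this]
      cases cs with
      | nil => rfl
      | cons d ds => exact ih h2 hex' d List.mem_cons_self
    · exact ih h2 hex' m hm'


lemma pv_measure_lt' {l seen seen' : List String} {n : String} (hn : n ∈ l) (hns : n ∉ seen)
    (hiff : ∀ k, k ∈ seen' ↔ k ∈ seen ∨ k = n) :
    (l.filter (fun k => decide (k ∉ seen'))).length
      < (l.filter (fun k => decide (k ∉ seen))).length := by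
  have hsub : ∀ k, (decide (k ∉ seen')) = (decide (¬ k = n) && decide (k ∉ seen)) := by
    intro k
    by_cases h1 : k = n <;> by_cases h2 : k ∈ seen <;> simp [h1, h2, hiff]
  simp only [hsub]
  rw [← List.filter_filter]
  exact List.length_filter_lt_length_iff_exists.mpr ⟨n, by simp [hn, hns]⟩

lemma pv_not_key_get?_none {hier : PySem.Dict String (List String)} {p : String}
    (h : p ∉ pvKeys hier) : hier.get? p = none := by
  rw [PySem.Dict.get?_eq_none_iff_not_mem_keys]
  intro hm
  exact h (by simpa [pvKeys, List.mem_dedup] using hm)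

lemma pvWalkA_dead {exa : PySem.Dict String String} {hier : PySem.Dict String (List String)}
    {p : String} (h : hier.get? p = none) (f : Nat) (s : PySem.Set String) :
    pvWalkA exa hier f s p = none := by
  cases f with
  | zero => rfl
  | succ f => simp [pvWalkA, h]

-- A's inner walk computes the reference function (visited = the chain walked so far)
lemma pvWalkA_eq_pvRes {exa : PySem.Dict String String} {hier : PySem.Dict String (List String)} :
    ∀ (fuel : Nat) (l : List String) (current : String) (visited : PySem.Set String),
      pvChain hier l current →
      (∀ x ∈ l, exa.get? x = none) → exa.get? current = none →
      (∀ x, x ∈ visited ↔ x ∈ l ++ [current]) →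
      ((pvKeys hier).filter (fun k => decide (k ∉ l ++ [current]))).length < fuel →
      pvWalkA exa hier fuel visited current = pvRes exa hier current := by
  intro fuel
  induction fuel with
  | zero => intro l current visited _ _ _ _ hlt; omega
  | succ f ih =>
    intro l current visited hch hall hcur hvis hlt
    cases hg : hier.get? current with
    | none =>
      simp only [pvWalkA, hg]
      rw [pvRes_dead hcur (by unfold pvStep; rw [hg])]
    | some parents =>
      cases parents with
      | nil =>
        simp only [pvWalkA, hg]
        rw [pvRes_dead hcur (by unfold pvStep; rw [hg])]
      | cons parent rest =>
        have hstep : pvStep hier current = some parent := by unfold pvStep; rw [hg]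
        have hres : pvRes exa hier current = pvRes exa hier parent := pvRes_step hcur hstep
        simp only [pvWalkA, hg]
        rw [hres]
        by_cases hv : parent ∈ l ++ [current]
        · rw [if_pos (by rw [PySem.Set.contains_iff]; exact (hvis parent).mpr hv)]
          have hch' : pvChain hier (l ++ [current]) parent := pvChain_snoc hch hstep
          have hcl : ∀ x ∈ l ++ [current], ∃ y ∈ l ++ [current], pvStep hier x = some y := by
            intro x hx
            obtain ⟨y, hy, hmem⟩ := pvChain_step_mem hch' x hx
            rcases hmem with h | h
            · exact ⟨y, h, hy⟩
            · exact ⟨y, h ▸ hv, hy⟩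
          exact (pvR_cycle [] parent (l ++ [current]) hv
            (by intro x hx
                rcases List.mem_append.mp hx with h | h
                · exact hall x h
                · simp at h; subst h; exact hcur) hcl).symm
        · rw [if_neg (by rw [PySem.Set.contains_iff]; exact fun h => hv ((hvis parent).mp h))]
          cases he : exa.get? parent with
          | some v => rw [pvRes_exact (by simp [he]), he]
          | none =>
            by_cases hk : parent ∈ pvKeys hier
            · exact ih (l ++ [current]) parent (visited.add parent)
                (pvChain_snoc hch hstep)
                (by intro x hx
                    rcases List.mem_append.mp hx with h | h
                    · exact hall x h
                    · simp at h; subst h; exact hcur)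
                he
                (by intro x
                    rw [PySem.Set.mem_add, hvis x, List.mem_append (s := l ++ [current])]
                    simp)
                (by have := pv_measure_lt' (l := pvKeys hier)
                      (seen := l ++ [current]) (seen' := (l ++ [current]) ++ [parent]) hk hv
                      (by intro k; simp; tauto)
                    omega)
            · have hgp : hier.get? parent = none := pv_not_key_get?_none hk
              rw [pvWalkA_dead hgp, pvRes_dead he (by unfold pvStep; rw [hgp])]

-- every cached value is the reference value
def pvSound (exa : PySem.Dict String String) (hier : PySem.Dict String (List String))
    (cache : PySem.Dict String (Option String)) : Prop :=
  ∀ k v, cache.get? k = some v → v = pvRes exa hier k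

lemma pvSound_empty {exa : PySem.Dict String String} {hier : PySem.Dict String (List String)} :
    pvSound exa hier PySem.Dict.empty := by
  intro k v h
  simp [PySem.Dict.get?, PySem.Dict.empty] at h

-- B's chase loop returns the reference value, and every collected node shares it
lemma pvResolve_spec {exa : PySem.Dict String String} {hier : PySem.Dict String (List String)}
    {cache : PySem.Dict String (Option String)} (hsound : pvSound exa hier cache) :
    ∀ (fuel : Nat) (path : List String) (onpath : PySem.Set String) (cur : String),
      pvChain hier path cur → (∀ x ∈ path, exa.get? x = none) →
      (∀ x, x ∈ onpath ↔ x ∈ path) →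
      ((pvKeys hier).filter (fun k => decide (k ∉ path))).length < fuel →
      (pvResolve exa hier cache fuel path onpath cur).1 = pvRes exa hier cur ∧
      ∀ m ∈ (pvResolve exa hier cache fuel path onpath cur).2,
        pvRes exa hier m = pvRes exa hier cur := by
  intro fuel
  induction fuel with
  | zero => intro path onpath cur _ _ _ hlt; omega
  | succ f ih =>
    intro path onpath cur hch hall hon hlt
    cases hc : cache.get? cur with
    | some val =>
      simp only [pvResolve, hc]
      exact ⟨hsound cur val hc, fun m hm => pvRes_chain_const hch hall m hm⟩
    | none =>
      cases he : exa.get? cur with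
      | some v =>
        simp only [pvResolve, hc, he]
        exact ⟨by rw [pvRes_exact (by simp [he]), he],
          fun m hm => pvRes_chain_const hch hall m hm⟩
      | none =>
        simp only [pvResolve, hc, he]
        by_cases hop : cur ∈ path
        · rw [if_pos (by rw [PySem.Set.contains_iff]; exact (hon cur).mpr hop)]
          have hcl : ∀ x ∈ path, ∃ y ∈ path, pvStep hier x = some y := by
            intro x hx
            obtain ⟨y, hy, hmem⟩ := pvChain_step_mem hch x hx
            rcases hmem with h | h
            · exact ⟨y, h, hy⟩
            · exact ⟨y, h ▸ hop, hy⟩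
          have : pvRes exa hier cur = none := pvR_cycle [] cur path hop hall hcl
          exact ⟨this.symm, fun m hm => pvRes_chain_const hch hall m hm⟩
        · rw [if_neg (by rw [PySem.Set.contains_iff]; exact fun h => hop ((hon cur).mp h))]
          cases hg : hier.get? cur with
          | none =>
            exact ⟨(pvRes_dead he (by unfold pvStep; rw [hg])).symm,
              fun m hm => pvRes_chain_const hch hall m hm⟩
          | some parents =>
            cases parents with
            | nil =>
              exact ⟨(pvRes_dead he (by unfold pvStep; rw [hg])).symm,
                fun m hm => pvRes_chain_const hch hall m hm⟩
            | cons p rest =>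
              have hstep : pvStep hier cur = some p := by unfold pvStep; rw [hg]
              have hk : cur ∈ pvKeys hier := pvStep_mem_keys hstep
              have hres : pvRes exa hier cur = pvRes exa hier p := pvRes_step he hstep
              have hih := ih (path ++ [cur]) (onpath.add cur) p
                (pvChain_snoc hch hstep)
                (by intro x hx
                    rcases List.mem_append.mp hx with h | h
                    · exact hall x h
                    · simp at h; subst h; exact he)
                (by intro x; rw [PySem.Set.mem_add, hon x, List.mem_append]; simp)
                (by have := pv_measure_lt' (l := pvKeys hier)
                      (seen := path) (seen' := path ++ [cur]) hk hop (by intro k; simp)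
                    omega)
              exact ⟨hih.1.trans hres.symm, fun m hm => (hih.2 m hm).trans hres.symm⟩

lemma pvSound_update {exa : PySem.Dict String String} {hier : PySem.Dict String (List String)}
    {val : Option String} :
    ∀ (p : List String) (cache : PySem.Dict String (Option String)),
      pvSound exa hier cache → (∀ m ∈ p, pvRes exa hier m = val) →
      pvSound exa hier (p.foldl (fun c n => c.insert n val) cache) := by
  intro p
  induction p with
  | nil => intro cache hs _; exact hs
  | cons a as ih =>
    intro cache hs hval
    simp only [List.foldl_cons]
    refine ih (cache.insert a val) ?_ (fun m hm => hval m (List.mem_cons_of_mem _ hm))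
    intro k v h
    rw [PySem.Dict.get?_insert] at h
    by_cases hk : k = a
    · rw [if_pos hk] at h
      cases h
      subst hk
      exact (hval k List.mem_cons_self).symm
    · rw [if_neg hk] at h
      exact hs k v h

-- the common per-key specification of both outer loops
def pvGSpec (exa : PySem.Dict String String) (hier : PySem.Dict String (List String))
    (bm : PySem.Dict String String) (kv : String × List String) : PySem.Dict String String :=
  if exa.contains kv.1 then bm
  else
    match pvRes exa hier kv.1 with
    | some v => bm.insert kv.1 v
    | none => bm


lemma pv_keys_len_bound (hierarchy : List (String × List String)) :
    (pvKeys (PySem.Dict.mk hierarchy)).length ≤ hierarchy.length := by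
  have h1 : (pvKeys (PySem.Dict.mk hierarchy)).length
      ≤ ((PySem.Dict.mk hierarchy).keys).length :=
    List.Sublist.length_le (List.dedup_sublist _)
  simpa [PySem.Dict.keys] using h1

-- the two exact_by_short constructions agree
lemma pvExact_eq (em : List (String × String)) : pvExactA em = pvExactB em := by
  unfold pvExactA pvExactB PySem.Dict.ofList PySem.Dict.update
  rw [List.foldl_map,
    PySem.List.foldl_if_eq_foldl_filter (p := fun q : String × String => PySem.Str.isIn "/CL_" q.2)
      (f := fun (d : PySem.Dict String String) (q : String × String) => d.insert (pvShort q.1) q.2)]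

-- A's outer loop is the specification fold
lemma A_outer (em : List (String × String)) (hierarchy : List (String × List String)) :
    build_broad_match_map em hierarchy
      = (hierarchy.foldl (pvGSpec (pvExactA em) (PySem.Dict.mk hierarchy))
          PySem.Dict.empty).items := by
  unfold build_broad_match_map
  refine congrArg PySem.Dict.items ?_
  apply PySem.List.foldl_congr_mem
  intro bm kv _
  unfold pvGSpec
  by_cases hcont : (pvExactA em).contains kv.1 = true
  · rw [if_pos hcont, if_pos hcont]
  · rw [if_neg hcont, if_neg hcont]
    have hgn : (pvExactA em).get? kv.1 = none := by
      rw [PySem.Dict.contains_eq_isSome_get?] at hcont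
      exact Option.not_isSome_iff_eq_none.mp (by simpa using hcont)
    rw [pvWalkA_eq_pvRes (hierarchy.length + 1) [] kv.1 _
      trivial (by intro x hx; cases hx) hgn
      (by intro x; rw [PySem.Set.mem_add]; simp)
      (by have h1 := List.length_filter_le
            (fun k => decide (k ∉ ([] : List String) ++ [kv.1])) (pvKeys (PySem.Dict.mk hierarchy))
          have h2 := pv_keys_len_bound hierarchy
          omega)]

-- B's outer loop is the specification fold (on the broad-map component)
lemma B_outer {exa : PySem.Dict String String} {hier : PySem.Dict String (List String)}
    {N : Nat} (hN : (pvKeys hier).length < N) :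
    ∀ (l : List (String × List String)) (bm : PySem.Dict String String)
      (cache : PySem.Dict String (Option String)), pvSound exa hier cache →
      (l.foldl
        (fun (st : PySem.Dict String String × PySem.Dict String (Option String)) kv =>
          if exa.contains kv.1 then st
          else
            match hier.get? kv.1 with
            | some (p :: _) =>
              let r := pvResolve exa hier st.2 N [] PySem.Set.empty p
              let cache' := r.2.foldl (fun c n => c.insert n r.1) st.2
              match r.1 with
              | some v => (st.1.insert kv.1 v, cache')
              | none => (st.1, cache')
            | _ => st)
        (bm, cache)).1 = l.foldl (pvGSpec exa hier) bm := by
  intro l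
  induction l with
  | nil => intro bm cache _; rfl
  | cons kv t ih =>
    intro bm cache hs
    simp only [List.foldl_cons]
    by_cases hcont : exa.contains kv.1 = true
    · rw [if_pos hcont]
      unfold pvGSpec
      rw [if_pos hcont]
      exact ih bm cache hs
    · rw [if_neg hcont]
      unfold pvGSpec
      rw [if_neg hcont]
      have hgn : exa.get? kv.1 = none := by
        rw [PySem.Dict.contains_eq_isSome_get?] at hcont
        exact Option.not_isSome_iff_eq_none.mp (by simpa using hcont)
      cases hg : hier.get? kv.1 with
      | none =>
        rw [pvRes_dead hgn (by unfold pvStep; rw [hg])]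
        exact ih bm cache hs
      | some parents =>
        cases parents with
        | nil =>
          rw [pvRes_dead hgn (by unfold pvStep; rw [hg])]
          exact ih bm cache hs
        | cons p rest =>
          have hstep : pvStep hier kv.1 = some p := by unfold pvStep; rw [hg]
          have hspec := pvResolve_spec hs N [] PySem.Set.empty p
            trivial (by intro x hx; cases hx) (by intro x; simp [PySem.Set.empty])
            (by have h1 := List.length_filter_le
                  (fun k => decide (k ∉ ([] : List String))) (pvKeys hier)
                omega)
          rw [pvRes_step hgn hstep, ← hspec.1]
          cases hv : (pvResolve exa hier cache N [] PySem.Set.empty p).1 with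
          | some v =>
            simp only [hv]
            exact ih (bm.insert kv.1 v) _
              (pvSound_update _ cache hs
                (fun m hm => by rw [hspec.2 m hm, ← hspec.1, hv]))
          | none =>
            simp only [hv]
            exact ih bm _
              (pvSound_update _ cache hs
                (fun m hm => by rw [hspec.2 m hm, ← hspec.1, hv]))

-- ===== VERDICT (by name: the statement is the Claim_ definition above) =====
theorem build_broad_match_map_spec : Claim_equal_build_broad_match_map := by
  intro em hierarchy _
  unfold Spec_build_broad_match_map
  rw [A_outer]
  unfold build_broad_match_map_alt
  rw [← pvExact_eq]
  refine (congrArg PySem.Dict.items ?_).symm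
  exact B_outer (by have := pv_keys_len_bound hierarchy; omega) hierarchy
    PySem.Dict.empty PySem.Dict.empty pvSound_empty
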